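-- pv_equiv track=rewrite | github.com/cla7aye15I4nd/Tython | tests/basic/test_tuple.py | sum_by_rotating_index
-- ===== SOURCE A (Python) =====
-- def sum_by_rotating_index(t: tuple[int, int, int, int], steps: int) -> int:
--     i: int = 0
--     total: int = 0
--     while i < steps:
--         idx: int = (i * 7 + 3) % len(t)
--         total = total + t[idx]
--         i = i + 1
--     return total
-- ===== SOURCE B (Python) =====
-- def sum_by_rotating_index(t: tuple[int, int, int, int], steps: int) -> int:
--     if steps <= 0:
--         return 0
--     n = len(t)
--     full, rem = divmod(steps, n)
--     cycle = sum(t[(i * 7 + 3) % n] for i in range(n))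
--     partial = sum(t[(i * 7 + 3) % n] for i in range(rem))
--     return full * cycle + partial
-- ===== Notes on version B (the rewrite author's own statement) =====
-- stated objective: alternative
-- what changed: Replaced the step-by-step accumulation loop by a closed form: the index (i*7+3) % len(t) is periodic in i with period len(t), so B sums one full period once and returns full_cycles * cycle_sum + partial_sum over the remainder (O(len(t)) instead of O(steps)).
import Mathlib
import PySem

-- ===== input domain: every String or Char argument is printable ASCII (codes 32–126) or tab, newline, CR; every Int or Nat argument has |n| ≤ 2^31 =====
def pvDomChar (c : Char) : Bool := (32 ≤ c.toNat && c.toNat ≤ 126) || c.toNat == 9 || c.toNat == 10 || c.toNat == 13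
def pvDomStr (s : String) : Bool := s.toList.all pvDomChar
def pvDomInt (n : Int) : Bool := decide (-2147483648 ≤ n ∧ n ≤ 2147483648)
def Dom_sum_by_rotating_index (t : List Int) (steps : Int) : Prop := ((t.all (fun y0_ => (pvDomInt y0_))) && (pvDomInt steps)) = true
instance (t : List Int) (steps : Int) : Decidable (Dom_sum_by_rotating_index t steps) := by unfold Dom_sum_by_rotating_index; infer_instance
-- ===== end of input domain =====

-- B replaces A's step-by-step loop by the period-len(t) closed form: full_cycles * cycle_sum + partial remainder sum (a different algorithm, O(len(t)) in the list rather than O(steps)).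


-- ===== PORT A =====
-- while i < steps: total += t[(i*7+3) % len(t)]; i += 1
def pvLoopA (t : List Int) (steps i total : Int) : Int :=
  if i < steps then
    pvLoopA t steps (i + 1)
      (total + PySem.List.pyGetD t (PySem.Int.mod (i * 7 + 3) (PySem.List.len t)) 0)
  else total
termination_by (steps - i).toNat
decreasing_by omega

def sum_by_rotating_index (t : List Int) (steps : Int) : Int :=
  pvLoopA t steps 0 0

-- ===== PORT B =====
def sum_by_rotating_index_alt (t : List Int) (steps : Int) : Int :=
  if steps ≤ 0 then 0
  else
    let n := PySem.List.len t
    let full := PySem.Int.floordiv steps n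
    let rem := PySem.Int.mod steps n
    let cycle := ((PySem.List.pyRange 0 n 1).map
      (fun i => PySem.List.pyGetD t (PySem.Int.mod (i * 7 + 3) n) 0)).sum
    let part := ((PySem.List.pyRange 0 rem 1).map
      (fun i => PySem.List.pyGetD t (PySem.Int.mod (i * 7 + 3) n) 0)).sum
    full * cycle + part

-- ===== PRECONDITION & SPEC =====
-- Pre_ excludes exactly the inputs where Python A raises ZeroDivisionError (t empty with steps > 0); B raises there too.
def Pre_sum_by_rotating_index (t : List Int) (steps : Int) : Prop := steps ≤ 0 ∨ t ≠ []
instance (t : List Int) (steps : Int) : Decidable (Pre_sum_by_rotating_index t steps) := by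
  unfold Pre_sum_by_rotating_index; infer_instance

def pvWitness_sum_by_rotating_index : List Int × Int := ([1, 2, 3, 4], 5)

def Spec_sum_by_rotating_index (t : List Int) (steps : Int) (out : Int) : Prop := out = sum_by_rotating_index_alt t steps
instance (t : List Int) (steps : Int) (out : Int) : Decidable (Spec_sum_by_rotating_index t steps out) := by unfold Spec_sum_by_rotating_index; infer_instance

-- ===== CLAIM (what is proved, stated in full; the proofs are below) =====
def Claim_equal_sum_by_rotating_index : Prop := ∀ (t : List Int) (steps : Int), Dom_sum_by_rotating_index t steps → Pre_sum_by_rotating_index t steps → Spec_sum_by_rotating_index t steps (sum_by_rotating_index t steps)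

-- ===== LEMMAS AND PROOFS =====

-- the per-step summand, as a function of the Nat loop counter
def pvG (t : List Int) (k : Nat) : Int :=
  PySem.List.pyGetD t (PySem.Int.mod ((k : Int) * 7 + 3) (t.length : Int)) 0

-- partial sums of pvG
def pvS (t : List Int) (m : Nat) : Int := ((List.range m).map (pvG t)).sum

lemma pvS_succ (t : List Int) (m : Nat) : pvS t (m + 1) = pvS t m + pvG t m := by
  simp [pvS, List.range_succ]

-- period len(t) in the loop counter
lemma pvG_period (t : List Int) (k : Nat) : pvG t (k + t.length) = pvG t k := by
  unfold pvG
  have h : ((k + t.length : Nat) : Int) * 7 + 3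
      = ((k : Int) * 7 + 3) + 7 * (t.length : Int) := by push_cast; ring
  rw [h]
  rcases Nat.eq_zero_or_pos t.length with h0 | h0
  · simp [h0]
  · have hpos : (0 : Int) < (t.length : Int) := by exact_mod_cast h0
    rw [PySem.Int.mod_eq_emod_of_pos hpos, PySem.Int.mod_eq_emod_of_pos hpos]
    simp

lemma pvS_add_period (t : List Int) (m : Nat) :
    pvS t (m + t.length) = pvS t m + pvS t t.length := by
  induction m with
  | zero => simp [pvS]
  | succ m ih =>
      have : m + 1 + t.length = (m + t.length) + 1 := by omega
      rw [this, pvS_succ, ih, pvG_period, pvS_succ]; ring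

lemma pvS_cycles (t : List Int) (q r : Nat) :
    pvS t (q * t.length + r) = (q : Int) * pvS t t.length + pvS t r := by
  induction q with
  | zero => simp
  | succ q ih =>
      have : (q + 1) * t.length + r = (q * t.length + r) + t.length := by ring
      rw [this, pvS_add_period, ih]; push_cast; ring

-- the loop computes the partial sums of pvG
lemma pvLoopA_eq (t : List Int) (steps : Int) :
    ∀ (m : Nat) (i total : Int), 0 ≤ i → i + m = steps →
      pvLoopA t steps i total
        = total + ((List.range m).map (fun k => pvG t (i.toNat + k))).sum := by
  intro m
  induction m with
  | zero =>
      intro i total h0 hm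
      rw [pvLoopA]
      have : ¬ i < steps := by omega
      simp [this]
  | succ m ih =>
      intro i total h0 hm
      rw [pvLoopA]
      have hlt : i < steps := by omega
      simp only [hlt, if_true]
      rw [ih (i + 1) _ (by omega) (by omega)]
      have hg : PySem.List.pyGetD t (PySem.Int.mod (i * 7 + 3) (PySem.List.len t)) 0
          = pvG t i.toNat := by
        unfold pvG
        have hi : ((i.toNat : Int)) = i := Int.toNat_of_nonneg h0
        rw [PySem.List.len_eq, hi]
      rw [hg]
      rw [List.range_succ_eq_map]
      simp only [List.map_cons, List.map_map, List.sum_cons]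
      have hfun : ((List.range m).map (fun k => pvG t ((i + 1).toNat + k)))
          = (List.range m).map ((fun k => pvG t (i.toNat + k)) ∘ Nat.succ) := by
        apply List.map_congr_left
        intro k _
        simp only [Function.comp]
        congr 1
        omega
      rw [hfun]
      ring_nf

lemma sum_by_rotating_index_eq_pvS (t : List Int) (steps : Int) (h : 0 ≤ steps) :
    sum_by_rotating_index t steps = pvS t steps.toNat := by
  unfold sum_by_rotating_index
  rw [pvLoopA_eq t steps steps.toNat 0 0 le_rfl (by omega)]
  simp [pvS]

-- B's pyRange sums are pvS
lemma pyRange_sum_eq_pvS (t : List Int) (m : Nat) :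
    ((PySem.List.pyRange 0 (m : Int) 1).map
      (fun i => PySem.List.pyGetD t (PySem.Int.mod (i * 7 + 3) (t.length : Int)) 0)).sum
      = pvS t m := by
  rw [PySem.List.pyRange_one]
  simp only [List.map_map, pvS]
  congr 1
  apply List.map_congr_left
  intro k _
  simp [pvG]

-- ===== VERDICT (by name: the statement is the Claim_ definition above) =====
theorem sum_by_rotating_index_spec : Claim_equal_sum_by_rotating_index := by
  intro t steps _ hpre
  unfold Spec_sum_by_rotating_index sum_by_rotating_index_alt
  by_cases hle : steps ≤ 0
  · simp only [hle, if_true]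
    unfold sum_by_rotating_index
    rw [pvLoopA]
    have : ¬ (0 : Int) < steps := by omega
    simp [this]
  · simp only [hle, if_false]
    have hpos : 0 < steps := by omega
    have htne : t ≠ [] := by
      rcases hpre with h | h
      · omega
      · exact h
    have hn : 0 < t.length := List.length_pos_iff.mpr htne
    have hnI : (0 : Int) < (t.length : Int) := by exact_mod_cast hn
    -- name the Nat quotient/remainder
    set s : Nat := steps.toNat with hs
    have hsteps : (s : Int) = steps := Int.toNat_of_nonneg (by omega)
    have hfull : PySem.Int.floordiv steps (PySem.List.len t) = ((s / t.length : Nat) : Int) := by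
      rw [PySem.List.len_eq, ← hsteps]; exact PySem.Int.floordiv_natCast s t.length
    have hrem : PySem.Int.mod steps (PySem.List.len t) = ((s % t.length : Nat) : Int) := by
      rw [PySem.List.len_eq, ← hsteps]; exact PySem.Int.mod_natCast s t.length
    rw [PySem.List.len_eq] at hfull hrem
    simp only [PySem.List.len_eq, hfull, hrem]
    rw [pyRange_sum_eq_pvS t t.length, pyRange_sum_eq_pvS t (s % t.length)]
    rw [sum_by_rotating_index_eq_pvS t steps (by omega), ← hs]
    have hdm : s = (s / t.length) * t.length + s % t.length := by rw [Nat.mul_comm (s / t.length)]; exact (Nat.div_add_mod s t.length).symm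
    calc pvS t s = pvS t ((s / t.length) * t.length + s % t.length) := by rw [← hdm]
      _ = ((s / t.length : Nat) : Int) * pvS t t.length + pvS t (s % t.length) :=
          pvS_cycles t (s / t.length) (s % t.length)
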